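-- pv_equiv track=rewrite | github.com/vivekup3424/Coding_Problems | leetcode/python/49.py | get_hashed_value
-- ===== SOURCE A (Python) =====
-- def get_hashed_value(s: str) -> int:
--     count = [0] * 26
--     for c in s:
--         count[ord(c) - ord("a")] += 1
--     seed = 0
--     for i in range(26):
--         seed = seed * 31 + count[i]
--     return seed
-- ===== SOURCE B (Python) =====
-- WEIGHTS = [31 ** (25 - i) for i in range(26)]
--
--
-- def get_hashed_value(s: str) -> int:
--     seed = 0
--     for c in s:
--         seed += WEIGHTS[ord(c) - ord("a")]
--     return seed
-- ===== Notes on version B (the rewrite author's own statement) =====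
-- stated objective: simpler
-- what changed: Replaces the 26-bucket count array plus a second Horner loop over all 26 buckets by a precomputed 26-entry weight table and a single pass that adds each character's weight directly to the hash.
import Mathlib
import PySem

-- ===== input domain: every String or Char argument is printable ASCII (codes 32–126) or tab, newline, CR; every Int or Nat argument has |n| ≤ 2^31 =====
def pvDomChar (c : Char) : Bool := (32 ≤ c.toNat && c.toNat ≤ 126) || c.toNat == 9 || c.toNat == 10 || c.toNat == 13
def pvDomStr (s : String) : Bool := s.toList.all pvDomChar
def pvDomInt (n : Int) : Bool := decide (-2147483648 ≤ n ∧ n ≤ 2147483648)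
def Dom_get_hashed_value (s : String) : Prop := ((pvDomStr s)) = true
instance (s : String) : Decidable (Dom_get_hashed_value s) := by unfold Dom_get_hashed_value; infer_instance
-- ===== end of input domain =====

-- B replaces A's count array + second Horner loop by a precomputed weight table and one direct weighted-sum pass (simpler, single pass).


-- ===== PORT A =====
def get_hashed_value (s : String) : Int :=
  let count := s.toList.foldl
    (fun count c =>
      PySem.List.pySetD count ((c.toNat : Int) - 97)
        (PySem.List.pyGetD count ((c.toNat : Int) - 97) 0 + 1))
    (List.replicate 26 (0 : Int))
  (PySem.List.pyRange 0 26 1).foldl (fun seed i => seed * 31 + PySem.List.pyGetD count i 0) 0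

-- ===== PORT B =====
def pvWeights : List Int := (List.range 26).map (fun i => (31 : Int) ^ (25 - i))

def get_hashed_value_alt (s : String) : Int :=
  s.toList.foldl (fun seed c => seed + PySem.List.pyGetD pvWeights ((c.toNat : Int) - 97) 0) 0

-- ===== PRECONDITION & SPEC =====
-- Pre_ excludes exactly the strings on which A (and B) raise IndexError: a character whose
-- code point is outside 71..122 yields a list index outside [-26, 25] for the 26-element array.
def Pre_get_hashed_value (s : String) : Prop :=
  s.toList.all (fun c => 71 ≤ c.toNat && c.toNat ≤ 122) = true
instance (s : String) : Decidable (Pre_get_hashed_value s) := by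
  unfold Pre_get_hashed_value; infer_instance

def pvWitness_get_hashed_value : String := "glass"

def Spec_get_hashed_value (s : String) (out : Int) : Prop := out = get_hashed_value_alt s
instance (s : String) (out : Int) : Decidable (Spec_get_hashed_value s out) := by
  unfold Spec_get_hashed_value; infer_instance

-- ===== CLAIM (what is proved, stated in full; the proofs are below) =====
def Claim_equal_get_hashed_value : Prop :=
  ∀ (s : String), Dom_get_hashed_value s → Pre_get_hashed_value s →
    Spec_get_hashed_value s (get_hashed_value s)

-- ===== LEMMAS AND PROOFS =====

-- Horner evaluation of a count list, as A's second loop computes it.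
def pvHorner (xs : List Int) (a : Int) : Int := xs.foldl (fun sd x => sd * 31 + x) a

-- Python's normalisation of an in-range (possibly negative) index into a 26-element list.
def pvJ (i : Int) : Nat := (i + 26).toNat % 26

theorem pvIdx_eq (i : Int) (h1 : -26 ≤ i) (h2 : i < 26) :
    PySem.List.pyIdx? 26 i = some (pvJ i) := by
  simp only [PySem.List.pyIdx?, pvJ]
  split_ifs with h3 h4 h5 <;> [skip; omega; skip; omega]
  · congr 1; omega
  · congr 1; omega

theorem pvJ_lt (i : Int) (_h1 : -26 ≤ i) (_h2 : i < 26) : pvJ i < 26 := by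
  unfold pvJ; omega

theorem pvGetD_eq (xs : List Int) (i : Int) (hlen : xs.length = 26)
    (h1 : -26 ≤ i) (h2 : i < 26) :
    PySem.List.pyGetD xs i 0 = xs.getD (pvJ i) 0 := by
  simp [PySem.List.pyGetD, PySem.List.pyGet?, hlen, pvIdx_eq i h1 h2, List.getD]

theorem pvSetD_eq (xs : List Int) (i : Int) (v : Int) (hlen : xs.length = 26)
    (h1 : -26 ≤ i) (h2 : i < 26) :
    PySem.List.pySetD xs i v = xs.set (pvJ i) v := by
  simp [PySem.List.pySetD, PySem.List.pySet?, hlen, pvIdx_eq i h1 h2]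

theorem pvHorner_shift (xs : List Int) (a d : Int) :
    pvHorner xs (a + d) = pvHorner xs a + d * 31 ^ xs.length := by
  induction xs generalizing a d with
  | nil => simp [pvHorner]
  | cons x tl ih =>
    simp only [pvHorner, List.foldl_cons, List.length_cons] at *
    have : (a + d) * 31 + x = (a * 31 + x) + d * 31 := by ring
    rw [this, ih]
    ring

theorem pvHorner_cons (x : Int) (tl : List Int) (a : Int) :
    pvHorner (x :: tl) a = pvHorner tl (a * 31 + x) := rfl

theorem pvHorner_set (xs : List Int) (j : Nat) (v a : Int) (hj : j < xs.length) :
    pvHorner (xs.set j v) a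
      = pvHorner xs a + (v - xs.getD j 0) * 31 ^ (xs.length - 1 - j) := by
  induction xs generalizing j a with
  | nil => simp at hj
  | cons x tl ih =>
    cases j with
    | zero =>
      rw [List.set_cons_zero, pvHorner_cons, pvHorner_cons,
          show a * 31 + v = (a * 31 + x) + (v - x) from by ring, pvHorner_shift]
      simp [List.getD]
    | succ j =>
      have hj' : j < tl.length := by
        simp only [List.length_cons] at hj; omega
      rw [List.set_cons_succ, pvHorner_cons, pvHorner_cons, ih j (a * 31 + x) hj']
      simp only [List.getD, List.getElem?_cons_succ, List.length_cons,
        show tl.length + 1 - 1 - (j + 1) = tl.length - 1 - j from by omega]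

theorem pvWeights_getD (j : Nat) (hj : j < 26) :
    pvWeights.getD j 0 = (31 : Int) ^ (25 - j) := by
  unfold pvWeights
  exact PySem.List.getD_map_range _ 26 j 0 hj

theorem pvWeights_length : pvWeights.length = 26 := by decide

-- One character processed: its effect on the Horner value is exactly its weight.
theorem pvStep (xs : List Int) (c : Char) (a : Int) (hlen : xs.length = 26)
    (h1 : 71 ≤ c.toNat) (h2 : c.toNat ≤ 122) :
    pvHorner (PySem.List.pySetD xs ((c.toNat : Int) - 97)
        (PySem.List.pyGetD xs ((c.toNat : Int) - 97) 0 + 1)) a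
      = pvHorner xs a + PySem.List.pyGetD pvWeights ((c.toNat : Int) - 97) 0 := by
  set i : Int := (c.toNat : Int) - 97 with hi
  have hb1 : -26 ≤ i := by omega
  have hb2 : i < 26 := by omega
  have hj := pvJ_lt i hb1 hb2
  rw [pvSetD_eq xs i _ hlen hb1 hb2, pvGetD_eq xs i hlen hb1 hb2,
      pvGetD_eq pvWeights i pvWeights_length hb1 hb2,
      pvHorner_set xs (pvJ i) _ a (by omega), pvWeights_getD (pvJ i) hj, hlen]
  ring_nf

theorem pvLength_step (xs : List Int) (c : Char) :
    (PySem.List.pySetD xs ((c.toNat : Int) - 97)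
        (PySem.List.pyGetD xs ((c.toNat : Int) - 97) 0 + 1)).length = xs.length := by
  cases h : PySem.List.pyIdx? xs.length ((c.toNat : Int) - 97) <;>
    simp [PySem.List.pySetD, PySem.List.pySet?, h]

theorem pvLength_foldl (cs : List Char) (xs : List Int) :
    (cs.foldl
      (fun count c =>
        PySem.List.pySetD count ((c.toNat : Int) - 97)
          (PySem.List.pyGetD count ((c.toNat : Int) - 97) 0 + 1)) xs).length = xs.length := by
  induction cs generalizing xs with
  | nil => rfl
  | cons c tl ih => rw [List.foldl_cons, ih, pvLength_step]

-- Main invariant: Horner of the final count = Horner of the initial count + B's running sum.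
theorem pvMain (cs : List Char) (xs : List Int) (hlen : xs.length = 26)
    (hcs : ∀ c ∈ cs, 71 ≤ c.toNat ∧ c.toNat ≤ 122) :
    pvHorner (cs.foldl
      (fun count c =>
        PySem.List.pySetD count ((c.toNat : Int) - 97)
          (PySem.List.pyGetD count ((c.toNat : Int) - 97) 0 + 1)) xs) 0
      = pvHorner xs 0
        + cs.foldl (fun seed c => seed + PySem.List.pyGetD pvWeights ((c.toNat : Int) - 97) 0) 0 := by
  induction cs generalizing xs with
  | nil => simp
  | cons c tl ih =>
    have hc := hcs c (by simp)
    simp only [List.foldl_cons]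
    rw [ih _ (by rw [pvLength_step, hlen]) (fun d hd => hcs d (by simp [hd])),
        pvStep xs c 0 hlen hc.1 hc.2,
        PySem.List.foldl_add tl _ (0 + PySem.List.pyGetD pvWeights ((c.toNat : Int) - 97) 0),
        PySem.List.foldl_add tl _ 0]
    ring

-- ===== VERDICT (by name: the statement is the Claim_ definition above) =====
theorem get_hashed_value_spec : Claim_equal_get_hashed_value := by
  intro s _ hpre
  have hpre' : ∀ c ∈ s.toList, 71 ≤ c.toNat ∧ c.toNat ≤ 122 := by
    intro c hc
    simpa using List.all_eq_true.mp hpre c hc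
  unfold Spec_get_hashed_value get_hashed_value get_hashed_value_alt
  set count := s.toList.foldl
    (fun count c =>
      PySem.List.pySetD count ((c.toNat : Int) - 97)
        (PySem.List.pyGetD count ((c.toNat : Int) - 97) 0 + 1))
    (List.replicate 26 (0 : Int)) with hc
  have hlen : count.length = 26 := by
    rw [hc, pvLength_foldl]
    simp
  have h26 : (26 : Int) = PySem.List.len count := by
    simp [PySem.List.len, hlen]
  rw [show PySem.List.pyRange 0 26 1 = PySem.List.pyRange 0 (PySem.List.len count) from by rw [← h26]]
  rw [PySem.List.foldl_pyRange_pyGetD count 0 (fun sd x => sd * 31 + x) 0 (by norm_num)]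
  simp only [Int.toNat_zero, List.drop_zero]
  have := pvMain s.toList (List.replicate 26 0) (by simp) hpre'
  rw [← hc] at this
  simpa [pvHorner] using this
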